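-- pv_equiv track=rewrite | github.com/ms303956362/myexercise | Cpp/LeetCode/wc189_3.py | peopleIndexes
-- ===== SOURCE A (Python) =====
-- def peopleIndexes(fc):
--     n = len(fc)
--     res = []
--     for i in range(n):
--         ok = True
--         for j in range(n):
--             if i != j and set(fc[i]) & set(fc[j]) == set(fc[i]):
--                 ok = False
--                 break
--         if ok:
--             res.append(i)
--     return res
-- ===== SOURCE B (Python) =====
-- def peopleIndexes(fc):
--     n = len(fc)
--     posting = {}
--     for i, lst in enumerate(fc):
--         for e in lst:
--             posting.setdefault(e, set()).add(i)
--     res = []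
--     for i, lst in enumerate(fc):
--         inter = set(range(n))
--         for e in lst:
--             inter &= posting[e]
--         if inter == {i}:
--             res.append(i)
--     return res
-- ===== Notes on version B (the rewrite author's own statement) =====
-- stated objective: faster
-- what changed: Replaces the all-pairs set-intersection subset tests with an inverted index (element -> posting set of list indices) built in one pass; an index qualifies iff intersecting the posting sets of its elements, starting from all indices, leaves exactly itself.
import Mathlib
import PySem

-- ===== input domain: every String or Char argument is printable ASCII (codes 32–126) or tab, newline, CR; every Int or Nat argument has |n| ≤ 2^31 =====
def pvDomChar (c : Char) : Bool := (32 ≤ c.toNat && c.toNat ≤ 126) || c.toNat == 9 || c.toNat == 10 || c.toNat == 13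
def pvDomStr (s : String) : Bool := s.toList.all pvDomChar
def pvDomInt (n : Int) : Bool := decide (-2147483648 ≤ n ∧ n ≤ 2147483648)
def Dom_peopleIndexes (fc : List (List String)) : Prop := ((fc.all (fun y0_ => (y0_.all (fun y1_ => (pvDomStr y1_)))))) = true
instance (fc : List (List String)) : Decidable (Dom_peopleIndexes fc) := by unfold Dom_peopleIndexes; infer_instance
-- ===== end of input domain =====

-- B replaces A's all-pairs subset tests by an inverted index (element -> posting set of list
-- indices) and keeps an index iff the intersection of its elements' posting sets is exactly
-- that index (measurably faster on the generated timing inputs).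

-- ===== PORT A =====
-- inner 'for j in range(n)' with break on the first j ≠ i with set(fc[i]) & set(fc[j]) == set(fc[i])
def pvAInner (fc : List (List String)) (i : Int) : List Int → Bool
  | [] => true
  | j :: js =>
    if i ≠ j ∧ PySem.Set.equal
        (PySem.Set.inter (PySem.Set.ofList (PySem.List.pyGetD fc i []))
                         (PySem.Set.ofList (PySem.List.pyGetD fc j [])))
        (PySem.Set.ofList (PySem.List.pyGetD fc i [])) = true
    then false else pvAInner fc i js

def peopleIndexes (fc : List (List String)) : List Int :=
  let n : Int := fc.length
  (PySem.List.pyRange 0 n).foldl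
    (fun res i => if pvAInner fc i (PySem.List.pyRange 0 n) then res ++ [i] else res) []

-- ===== PORT B =====
-- 'posting.setdefault(e, set()).add(i)' over one row
def pvPostRow (i : Int) (d : PySem.Dict String (PySem.Set Int)) (lst : List String) :
    PySem.Dict String (PySem.Set Int) :=
  lst.foldl (fun d e => PySem.Dict.modify d e [] (fun s => PySem.Set.add s i)) d

def pvPosting (fc : List (List String)) : PySem.Dict String (PySem.Set Int) :=
  (PySem.List.enumerate fc).foldl (fun d p => pvPostRow p.1 d p.2) PySem.Dict.empty

-- 'inter = set(range(n)); for e in lst: inter &= posting[e]'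
-- (posting[e] ported as getD e ∅: exact here, since every e of the row is a key of posting)
def pvInterRow (posting : PySem.Dict String (PySem.Set Int)) (n : Int) (lst : List String) :
    PySem.Set Int :=
  lst.foldl (fun s e => PySem.Set.inter s (posting.getD e []))
    (PySem.Set.ofList (PySem.List.pyRange 0 n))

def peopleIndexes_alt (fc : List (List String)) : List Int :=
  let n : Int := fc.length
  let posting := pvPosting fc
  (PySem.List.enumerate fc).foldl
    (fun res p =>
      if PySem.Set.equal (pvInterRow posting n p.2) (PySem.Set.ofList [p.1])
      then res ++ [p.1] else res) []

-- ===== PRECONDITION & SPEC =====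
def Spec_peopleIndexes (fc : List (List String)) (out : List Int) : Prop := out = peopleIndexes_alt fc
instance (fc : List (List String)) (out : List Int) : Decidable (Spec_peopleIndexes fc out) := by unfold Spec_peopleIndexes; infer_instance

-- ===== CLAIM (what is proved, stated in full; the proofs are below) =====
def Claim_equal_peopleIndexes : Prop := ∀ (fc : List (List String)), Dom_peopleIndexes fc → Spec_peopleIndexes fc (peopleIndexes fc)

-- ===== LEMMAS AND PROOFS =====

theorem pvGetD_getElem (fc : List (List String)) (k : Nat) (hk : k < fc.length) :
    PySem.List.pyGetD fc (k : Int) [] = fc[k] := by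
  simp [PySem.List.pyGetD_natCast, List.getD_eq_getElem?_getD, hk]

theorem pvAInner_eq_all (fc : List (List String)) (i : Int) (js : List Int) :
    pvAInner fc i js = true ↔
      ∀ j ∈ js, ¬(i ≠ j ∧ PySem.Set.equal
        (PySem.Set.inter (PySem.Set.ofList (PySem.List.pyGetD fc i []))
                         (PySem.Set.ofList (PySem.List.pyGetD fc j [])))
        (PySem.Set.ofList (PySem.List.pyGetD fc i [])) = true) := by
  induction js with
  | nil => simp [pvAInner]
  | cons j js ih =>
    rw [pvAInner]
    split_ifs with h
    · exact iff_of_false (by simp) (fun hall => hall j (List.mem_cons_self ..) h)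
    · rw [ih]
      constructor
      · intro hall j' hj'
        rcases List.mem_cons.1 hj' with rfl | hj''
        · exact h
        · exact hall j' hj''
      · exact fun hall j' hj' => hall j' (List.mem_cons_of_mem _ hj')

theorem pvSubset_iff (A B : List String) :
    PySem.Set.equal (PySem.Set.inter (PySem.Set.ofList A) (PySem.Set.ofList B))
      (PySem.Set.ofList A) = true ↔ ∀ x ∈ A, x ∈ B := by
  rw [PySem.Set.equal_iff]
  constructor
  · intro h x hx
    have := (h x).2 (by simpa [PySem.Set.mem_ofList] using hx)
    rw [PySem.Set.mem_inter, PySem.Set.mem_ofList, PySem.Set.mem_ofList] at this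
    exact this.2
  · intro h x
    rw [PySem.Set.mem_inter, PySem.Set.mem_ofList, PySem.Set.mem_ofList]
    exact ⟨fun hx => hx.1, fun hx => ⟨hx, h x hx⟩⟩

theorem mem_pvPostRow (i : Int) (d : PySem.Dict String (PySem.Set Int)) (lst : List String)
    (e : String) (j : Int) :
    j ∈ (pvPostRow i d lst).getD e [] ↔ j ∈ d.getD e [] ∨ (e ∈ lst ∧ j = i) := by
  induction lst generalizing d with
  | nil => simp [pvPostRow]
  | cons a lst ih =>
    show j ∈ (pvPostRow i (PySem.Dict.modify d a [] (fun s => PySem.Set.add s i)) lst).getD e []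
      ↔ _
    rw [ih]
    by_cases he : e = a
    · subst he
      rw [PySem.Dict.getD_modify_self, PySem.Set.mem_add]
      simp only [List.mem_cons]
      tauto
    · rw [PySem.Dict.getD_modify_of_ne _ _ _ he]
      simp only [List.mem_cons]
      tauto

theorem mem_pvPosting_aux (ps : List (Int × List String)) (d : PySem.Dict String (PySem.Set Int))
    (e : String) (j : Int) :
    j ∈ (ps.foldl (fun d p => pvPostRow p.1 d p.2) d).getD e [] ↔
      j ∈ d.getD e [] ∨ ∃ p ∈ ps, e ∈ p.2 ∧ j = p.1 := by
  induction ps generalizing d with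
  | nil => simp
  | cons p ps ih =>
    rw [List.foldl_cons, ih, mem_pvPostRow]
    simp only [List.mem_cons]
    constructor
    · rintro ((h | h) | ⟨q, hq, hh⟩)
      · exact Or.inl h
      · exact Or.inr ⟨p, Or.inl rfl, h⟩
      · exact Or.inr ⟨q, Or.inr hq, hh⟩
    · rintro (h | ⟨q, (rfl | hq), hh⟩)
      · exact Or.inl (Or.inl h)
      · exact Or.inl (Or.inr hh)
      · exact Or.inr ⟨q, hq, hh⟩

theorem mem_pvPosting (fc : List (List String)) (e : String) (j : Int) :
    j ∈ (pvPosting fc).getD e [] ↔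
      ∃ (k : Nat) (_ : k < fc.length), e ∈ fc[k] ∧ j = (k : Int) := by
  rw [pvPosting, mem_pvPosting_aux, PySem.Dict.getD_empty]
  simp only [List.not_mem_nil, false_or]
  constructor
  · rintro ⟨p, hp, he, hj⟩
    rcases (PySem.List.mem_enumerate_iff _ _ _).1 hp with ⟨k, hk, rfl⟩
    exact ⟨k, hk, by simpa using he, by simpa using hj⟩
  · rintro ⟨k, hk, he, rfl⟩
    exact ⟨((k : Int), fc[k]), (PySem.List.mem_enumerate_iff _ _ _).2 ⟨k, hk, by simp⟩, he, rfl⟩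

theorem mem_pvInterRow (posting : PySem.Dict String (PySem.Set Int)) (n : Int)
    (lst : List String) (j : Int) :
    j ∈ pvInterRow posting n lst ↔
      (0 ≤ j ∧ j < n) ∧ ∀ e ∈ lst, j ∈ posting.getD e [] := by
  have key : ∀ (l : List String) (s : PySem.Set Int),
      j ∈ l.foldl (fun s e => PySem.Set.inter s (posting.getD e [])) s ↔
        j ∈ s ∧ ∀ e ∈ l, j ∈ posting.getD e [] := by
    intro l
    induction l with
    | nil => simp
    | cons a l ih =>
      intro s
      rw [List.foldl_cons, ih, PySem.Set.mem_inter]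
      simp only [List.mem_cons]
      constructor
      · rintro ⟨⟨hs, ha⟩, hl⟩
        exact ⟨hs, fun e he => by rcases he with rfl | he; exacts [ha, hl e he]⟩
      · rintro ⟨hs, hl⟩
        exact ⟨⟨hs, hl a (Or.inl rfl)⟩, fun e he => hl e (Or.inr he)⟩
  rw [pvInterRow, key, PySem.Set.mem_ofList, PySem.List.mem_pyRange_one]

-- the two per-index conditions agree on every index k of fc
theorem pvPred_eq (fc : List (List String)) (k : Nat) (hk : k < fc.length) :
    pvAInner fc (k : Int) (PySem.List.pyRange 0 (fc.length : Int)) =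
      PySem.Set.equal (pvInterRow (pvPosting fc) (fc.length : Int) fc[k])
        (PySem.Set.ofList [(k : Int)]) := by
  rw [Bool.eq_iff_iff, pvAInner_eq_all, PySem.Set.equal_iff]
  constructor
  · intro h j
    rw [mem_pvInterRow]
    simp only [PySem.Set.mem_ofList, List.mem_singleton]
    constructor
    · rintro ⟨⟨h0, hn⟩, hall⟩
      by_contra hne
      have hjm : j ∈ PySem.List.pyRange 0 (fc.length : Int) :=
        PySem.List.mem_pyRange_one.2 ⟨h0, hn⟩
      refine h j hjm ⟨fun he => hne he.symm, ?_⟩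
      rw [pvSubset_iff, pvGetD_getElem fc k hk]
      intro x hx
      rcases (mem_pvPosting fc x j).1 (hall x hx) with ⟨k', hk', hx', hj⟩
      rw [hj, pvGetD_getElem fc k' hk']
      exact hx'
    · rintro rfl
      refine ⟨⟨by positivity, by exact_mod_cast hk⟩, fun e he => ?_⟩
      exact (mem_pvPosting fc e (k : Int)).2 ⟨k, hk, he, rfl⟩
  · intro h j hjm hbad
    rcases hbad with ⟨hne, hsub⟩
    rcases PySem.List.mem_pyRange_one.1 hjm with ⟨h0, hn⟩
    have hjn : j.toNat < fc.length := by omega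
    have hjcast : j = ((j.toNat : Nat) : Int) := by omega
    have hjk : j = (k : Int) := by
      have hmem := (h j).1
      simp only [PySem.Set.mem_ofList, List.mem_singleton] at hmem
      apply hmem
      rw [mem_pvInterRow]
      refine ⟨⟨h0, hn⟩, fun e he => ?_⟩
      rw [pvSubset_iff, pvGetD_getElem fc k hk] at hsub
      have he' : e ∈ PySem.List.pyGetD fc j [] := hsub e he
      rw [hjcast, pvGetD_getElem fc j.toNat hjn] at he'
      exact (mem_pvPosting fc e j).2 ⟨j.toNat, hjn, he', by omega⟩
    exact hne hjk.symm

-- ===== VERDICT (by name: the statement is the Claim_ definition above) =====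
theorem peopleIndexes_spec : Claim_equal_peopleIndexes := by
  intro fc _
  show peopleIndexes fc = peopleIndexes_alt fc
  simp only [peopleIndexes, peopleIndexes_alt]
  rw [PySem.List.foldl_append_if_eq_filter
        (fun i => pvAInner fc i (PySem.List.pyRange 0 (fc.length : Int))),
      PySem.List.foldl_append_if
        (fun p : Int × List String =>
          PySem.Set.equal (pvInterRow (pvPosting fc) (fc.length : Int) p.2)
            (PySem.Set.ofList [p.1])) (fun p : Int × List String => p.1),
      PySem.List.enumerate_eq_map_pyRange fc ([] : List String),
      List.filter_map, List.map_map]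
  simp only [List.nil_append, Function.comp_def]
  have hid : (fun x : Int => ((x, PySem.List.pyGetD fc x ([] : List String)).1)) = fun x => x := rfl
  rw [hid, List.map_id']
  show _ = List.filter _ (PySem.List.pyRange 0 (PySem.List.len fc))
  have hlen : PySem.List.len fc = (fc.length : Int) := by simp [PySem.List.len]
  rw [hlen]
  apply List.filter_congr
  intro i hi
  rcases PySem.List.mem_pyRange_one.1 hi with ⟨h0, hn⟩
  have hk : i.toNat < fc.length := by omega
  have hcast : i = ((i.toNat : Nat) : Int) := by omega
  rw [hcast, pvGetD_getElem fc i.toNat hk]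
  exact pvPred_eq fc i.toNat hk
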